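-- pv_equiv track=rewrite | github.com/mark-bak/clap-jack | perfect.py | find_best_game
-- ===== SOURCE A (Python) =====
-- def find_best_game(ideals):
--     best_possible_score = []
--     pos=[]
--     for i in range(0,len(ideals[0])):
--         #this really shouldnt be harcoded like this but oh well
--         l = [ideals[0][i],ideals[1][i],ideals[2][i],ideals[3][i]]
--         best_possible_score.append(max(l))
--         pos.append(l.index(best_possible_score[-1]))
--     return best_possible_score,pos
-- ===== SOURCE B (Python) =====
-- def find_best_game(ideals):
--     # Row-major running max/argmax over the 4 ideal rows (instead of
--     # column-major gather + max + list.index per column).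
--     best = list(ideals[0])
--     pos = [0] * len(best)
--     for r in (1, 2, 3):
--         row = ideals[r]
--         new_pos = [r if v > b else p for v, b, p in zip(row, best, pos)]
--         best = [v if v > b else b for v, b in zip(row, best)]
--         pos = new_pos
--     return best, pos
-- ===== Notes on version B (the rewrite author's own statement) =====
-- stated objective: simpler
-- what changed: Replaced the column-major loop that gathers each column into a 4-element list and calls max() then list.index() with a row-major streaming running-max/argmax over rows 1..3, maintaining best and pos as running state (strict > keeps the earliest-row winner like list.index).
-- outside the precondition, e.g. on find_best_game([[]]): A returns ([], []), B raises IndexError; on find_best_game([[], []]): A returns ([], []), B raises IndexError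
import Mathlib
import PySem

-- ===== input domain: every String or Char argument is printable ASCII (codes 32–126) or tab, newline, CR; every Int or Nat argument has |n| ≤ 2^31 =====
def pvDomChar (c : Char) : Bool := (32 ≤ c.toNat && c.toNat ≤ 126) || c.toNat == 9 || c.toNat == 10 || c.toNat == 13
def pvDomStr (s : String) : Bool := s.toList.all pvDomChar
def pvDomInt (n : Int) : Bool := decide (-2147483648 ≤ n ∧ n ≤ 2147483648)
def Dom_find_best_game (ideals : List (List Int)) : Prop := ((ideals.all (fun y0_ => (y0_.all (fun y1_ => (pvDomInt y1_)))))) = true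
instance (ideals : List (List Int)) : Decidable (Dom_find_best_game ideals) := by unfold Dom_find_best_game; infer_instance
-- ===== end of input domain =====

-- B replaces A's column-major gather + max + list.index with a row-major running
-- max/argmax over the three remaining rows (simpler decomposition, same values).

-- ===== PORT A =====
def find_best_game (ideals : List (List Int)) : List Int × List Int :=
  (PySem.List.pyRange 0 ((PySem.List.pyGetD ideals 0 []).length : Int) 1).foldl
    (fun acc i =>
      let l : List Int :=
        [PySem.List.pyGetD (PySem.List.pyGetD ideals 0 []) i 0,
         PySem.List.pyGetD (PySem.List.pyGetD ideals 1 []) i 0,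
         PySem.List.pyGetD (PySem.List.pyGetD ideals 2 []) i 0,
         PySem.List.pyGetD (PySem.List.pyGetD ideals 3 []) i 0]
      let m := (PySem.List.max? l (fun x => x)).getD 0
      let idx := (PySem.List.index? l m).getD 0
      (acc.1 ++ [m], acc.2 ++ [(idx : Int)]))
    ([], [])

-- ===== PORT B =====
-- one pass of B's loop body: fold row r into (best, pos) via zip(row, best, pos)
def fbg_step (r : Int) (row : List Int) (bp : List Int × List Int) : List Int × List Int :=
  (List.zipWith (fun v b => if b < v then v else b) row bp.1,
   List.zipWith (fun v bp2 => if bp2.1 < v then r else bp2.2) row (bp.1.zip bp.2))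

def find_best_game_alt (ideals : List (List Int)) : List Int × List Int :=
  let best0 := PySem.List.pyGetD ideals 0 []
  let pos0 : List Int := List.replicate best0.length 0
  ([1, 2, 3] : List Int).foldl
    (fun bp r => fbg_step r (PySem.List.pyGetD ideals r []) bp) (best0, pos0)

-- ===== PRECONDITION & SPEC =====
-- Pre_ excludes the inputs with fewer than 4 rows or a row 1..3 shorter than row 0;
-- on those A raises IndexError, except when row 0 is empty and there are fewer than
-- 4 rows, where A's empty loop never touches the missing rows and returns ([], [])
-- while B's unconditional access to rows 1..3 raises.
def Pre_find_best_game (ideals : List (List Int)) : Prop :=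
  4 ≤ ideals.length ∧
  (ideals.getD 0 []).length ≤ (ideals.getD 1 []).length ∧
  (ideals.getD 0 []).length ≤ (ideals.getD 2 []).length ∧
  (ideals.getD 0 []).length ≤ (ideals.getD 3 []).length
instance (ideals : List (List Int)) : Decidable (Pre_find_best_game ideals) := by
  unfold Pre_find_best_game; infer_instance

def pvWitness_find_best_game : List (List Int) := [[1, 5], [2, 5], [0, 7], [2, 1]]

def Spec_find_best_game (ideals : List (List Int)) (out : List Int × List Int) : Prop := out = find_best_game_alt ideals
instance (ideals : List (List Int)) (out : List Int × List Int) : Decidable (Spec_find_best_game ideals out) := by unfold Spec_find_best_game; infer_instance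

-- ===== CLAIM (what is proved, stated in full; the proofs are below) =====
def Claim_equal_find_best_game : Prop := ∀ (ideals : List (List Int)), Dom_find_best_game ideals → Pre_find_best_game ideals → Spec_find_best_game ideals (find_best_game ideals)

-- ===== LEMMAS AND PROOFS =====

-- per-column scalar facts: A's max/first-index of [x0,x1,x2,x3] equal B's chained updates
lemma fbg_best_scalar (x0 x1 x2 x3 : Int) :
    (PySem.List.max? [x0,x1,x2,x3] (fun x => x)).getD 0
      = (if (if (if x0 < x1 then x1 else x0) < x2 then x2 else (if x0 < x1 then x1 else x0)) < x3
          then x3 else (if (if x0 < x1 then x1 else x0) < x2 then x2 else (if x0 < x1 then x1 else x0))) := by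
  rw [PySem.List.max?_id_cons]
  simp only [List.foldl, Option.getD_some]
  split_ifs <;> omega

lemma fbg_idx4_1 (x0 x1 x2 x3 : Int) (h : x0 ≠ x1) :
    PySem.List.index? [x0,x1,x2,x3] x1 = some 1 := by
  rw [PySem.List.index?_cons_of_ne _ h, PySem.List.index?_cons_self]; rfl

lemma fbg_idx4_2 (x0 x1 x2 x3 : Int) (h0 : x0 ≠ x2) (h1 : x1 ≠ x2) :
    PySem.List.index? [x0,x1,x2,x3] x2 = some 2 := by
  rw [PySem.List.index?_cons_of_ne _ h0, PySem.List.index?_cons_of_ne _ h1,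
      PySem.List.index?_cons_self]; rfl

lemma fbg_idx4_3 (x0 x1 x2 x3 : Int) (h0 : x0 ≠ x3) (h1 : x1 ≠ x3) (h2 : x2 ≠ x3) :
    PySem.List.index? [x0,x1,x2,x3] x3 = some 3 := by
  rw [PySem.List.index?_cons_of_ne _ h0, PySem.List.index?_cons_of_ne _ h1,
      PySem.List.index?_cons_of_ne _ h2, PySem.List.index?_cons_self]; rfl

lemma fbg_if_max (x y : Int) : (if x < y then y else x) = max x y := by
  rw [max_def]; split_ifs <;> omega

lemma fbg_pos_scalar (x0 x1 x2 x3 : Int) :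
    (((PySem.List.index? [x0,x1,x2,x3]
        ((PySem.List.max? [x0,x1,x2,x3] (fun x => x)).getD 0)).getD 0 : Nat) : Int)
    = (if (if (if x0 < x1 then x1 else x0) < x2 then x2 else (if x0 < x1 then x1 else x0)) < x3 then 3
       else if (if x0 < x1 then x1 else x0) < x2 then 2
       else if x0 < x1 then (1:Int) else 0) := by
  rw [PySem.List.max?_id_cons]
  simp only [List.foldl, Option.getD_some, fbg_if_max]
  have h01l : x0 ≤ max x0 x1 := le_max_left _ _
  have h01r : x1 ≤ max x0 x1 := le_max_right _ _
  have h2l : max x0 x1 ≤ max (max x0 x1) x2 := le_max_left _ _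
  have h2r : x2 ≤ max (max x0 x1) x2 := le_max_right _ _
  by_cases hA : max (max x0 x1) x2 < x3
  · rw [max_eq_right hA.le,
        fbg_idx4_3 x0 x1 x2 x3 (by omega) (by omega) (by omega), if_pos hA]
    rfl
  · rw [max_eq_left (not_lt.mp hA), if_neg hA]
    by_cases hB : max x0 x1 < x2
    · rw [max_eq_right hB.le, fbg_idx4_2 x0 x1 x2 x3 (by omega) (by omega), if_pos hB]
      rfl
    · rw [max_eq_left (not_lt.mp hB), if_neg hB]
      by_cases hC : x0 < x1
      · rw [max_eq_right hC.le, fbg_idx4_1 x0 x1 x2 x3 (by omega), if_pos hC]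
        rfl
      · rw [max_eq_left (not_lt.mp hC), PySem.List.index?_cons_self, if_neg hC]
        rfl

-- A's loop builds both output lists by appending one element per column
lemma fbg_foldl_split {β : Type} (F G : β → Int) (l : List β) (xs ys : List Int) :
    l.foldl (fun acc i => (acc.1 ++ [F i], acc.2 ++ [G i])) (xs, ys)
      = (xs ++ l.map F, ys ++ l.map G) := by
  induction l generalizing xs ys with
  | nil => simp
  | cons h t ih => simp [List.foldl, ih]

lemma fbg_main (a b c d : List Int) (t : List (List Int))
    (hb : a.length ≤ b.length) (hc : a.length ≤ c.length) (hd : a.length ≤ d.length) :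
    find_best_game (a::b::c::d::t) = find_best_game_alt (a::b::c::d::t) := by
  unfold find_best_game find_best_game_alt fbg_step
  simp only [PySem.List.pyGetD_ofNat', List.getD, List.getElem?_cons_zero,
    List.getElem?_cons_succ, Option.getD_some, List.foldl]
  rw [fbg_foldl_split]
  simp only [PySem.List.pyRange_zero_natCast, List.map_map, List.nil_append]
  refine Prod.ext ?_ ?_ <;> apply List.ext_getElem
  · simp [List.length_zipWith]; omega
  · intro k hk1 hk2
    simp only [List.getElem_map, List.getElem_range, List.getElem_zipWith,
      Function.comp_apply, PySem.List.pyGetD_natCast]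
    have ha : k < a.length := by simpa using hk1
    rw [List.getD_eq_getElem a 0 ha, List.getD_eq_getElem b 0 (by omega),
        List.getD_eq_getElem c 0 (by omega), List.getD_eq_getElem d 0 (by omega)]
    exact fbg_best_scalar _ _ _ _
  · simp [List.length_zipWith, List.length_zip]; omega
  · intro k hk1 hk2
    simp only [List.getElem_map, List.getElem_range, List.getElem_zipWith,
      List.getElem_zip, List.getElem_replicate,
      Function.comp_apply, PySem.List.pyGetD_natCast]
    have ha : k < a.length := by simpa using hk1
    rw [List.getD_eq_getElem a 0 ha, List.getD_eq_getElem b 0 (by omega),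
        List.getD_eq_getElem c 0 (by omega), List.getD_eq_getElem d 0 (by omega)]
    exact fbg_pos_scalar _ _ _ _

-- ===== VERDICT (by name: the statement is the Claim_ definition above) =====
theorem find_best_game_spec : Claim_equal_find_best_game := by
  intro ideals _ hpre
  unfold Spec_find_best_game
  obtain ⟨h4, hb, hc, hd⟩ := hpre
  match ideals, h4, hb, hc, hd with
  | a :: b :: c :: d :: t, _, hb, hc, hd =>
    exact fbg_main a b c d t hb hc hd
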